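-- pv_equiv track=rewrite | github.com/sgtkellox/CancerClassifier | TumorClassifier/split_dataset/sort_tiles_by_attribute.py | sortByGrade
-- ===== SOURCE A (Python) =====
-- def sortByGrade(wsis):
--
--     two = []
--     three = []
--     four = []
--
--     result = []
--
--     for slide in wsis:
--         diagPart = slide.split("-")[0]
--         if diagPart.startswith("GBM"):
--             four.append(slide)
--         elif diagPart[-1] == str(2):
--             two.append(slide)
--         elif diagPart[-1] == str(3):
--             three.append(slide)
--         elif diagPart[-1] == str(4):
--             four.append(slide)
--
--     result.append(two)
--     result.append(three)
--     result.append(four)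
--
--     return result
-- ===== SOURCE B (Python) =====
-- def sortByGrade(wsis):
--     def pre(s):
--         return s.split("-")[0]
--     two = [s for s in wsis if not pre(s).startswith("GBM") and pre(s)[-1] == "2"]
--     three = [s for s in wsis if not pre(s).startswith("GBM") and pre(s)[-1] == "3"]
--     four = [s for s in wsis if pre(s).startswith("GBM") or pre(s)[-1] == "4"]
--     return [two, three, four]
-- ===== Notes on version B (the rewrite author's own statement) =====
-- stated objective: alternative
-- what changed: Replaces the single stateful pass that appends into three mutable bucket lists by three independent filtering passes, one comprehension per bucket, with the elif chain re-expressed as boolean predicates.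
import Mathlib
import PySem

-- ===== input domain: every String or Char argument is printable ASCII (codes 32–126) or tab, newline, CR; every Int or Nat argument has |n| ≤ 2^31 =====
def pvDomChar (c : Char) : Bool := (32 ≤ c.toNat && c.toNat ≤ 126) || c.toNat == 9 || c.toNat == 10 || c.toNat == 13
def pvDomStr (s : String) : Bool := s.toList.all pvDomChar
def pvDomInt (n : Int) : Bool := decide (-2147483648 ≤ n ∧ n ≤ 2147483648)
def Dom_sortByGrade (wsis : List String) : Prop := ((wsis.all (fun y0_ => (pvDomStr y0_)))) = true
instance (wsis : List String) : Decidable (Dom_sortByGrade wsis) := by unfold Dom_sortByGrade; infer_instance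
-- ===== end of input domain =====

-- B replaces A's single stateful pass over three mutable buckets by three independent
-- filter passes (one predicate per bucket); same cost, different decomposition.


-- ===== PORT A =====
-- slide.split("-")[0]: splitOn never returns [], so [0] is its head
def pvDiagPart (slide : String) : String := ((PySem.Str.split? slide "-").getD []).headD ""

-- one loop over wsis keeping the three buckets (two, three, four) as state;
-- diagPart[-1] via pyGet?: 'none' is exactly Python's IndexError (excluded by Pre_)
def sortByGrade (wsis : List String) : List (List String) :=
  let st := wsis.foldl
    (fun (st : List String × List String × List String) slide =>
      let (two, three, four) := st
      let diagPart := pvDiagPart slide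
      if PySem.Str.startswith diagPart "GBM" then (two, three, four ++ [slide])
      else
        match PySem.Str.pyGet? diagPart (-1) with
        | none => (two, three, four)   -- Python raises IndexError here; Pre_ excludes it
        | some c =>
          if c = '2' then (two ++ [slide], three, four)
          else if c = '3' then (two, three ++ [slide], four)
          else if c = '4' then (two, three, four ++ [slide])
          else (two, three, four))
    ([], [], [])
  [st.1, st.2.1, st.2.2]

-- ===== PORT B =====
-- Source B's 'pre(s)[-1] == c'; none (Python IndexError, outside Pre_) compares unequal
def pvLastIs (s : String) (c : Char) : Bool := PySem.Str.pyGet? s (-1) == some c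

def sortByGrade_alt (wsis : List String) : List (List String) :=
  [ wsis.filter (fun s => !PySem.Str.startswith (pvDiagPart s) "GBM" && pvLastIs (pvDiagPart s) '2'),
    wsis.filter (fun s => !PySem.Str.startswith (pvDiagPart s) "GBM" && pvLastIs (pvDiagPart s) '3'),
    wsis.filter (fun s => PySem.Str.startswith (pvDiagPart s) "GBM" || pvLastIs (pvDiagPart s) '4') ]

-- ===== PRECONDITION & SPEC =====
-- Pre_ excludes exactly the inputs where Python A raises IndexError: a slide whose part
-- before the first '-' is empty (the empty string, or a slide starting with '-'); B raises there too.
def Pre_sortByGrade (wsis : List String) : Prop :=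
  ∀ s ∈ wsis, s.toList ≠ [] ∧ s.toList.head? ≠ some '-'
instance (wsis : List String) : Decidable (Pre_sortByGrade wsis) := by unfold Pre_sortByGrade; infer_instance
def pvWitness_sortByGrade : List String := ["GBM-a", "x2-b", "y3", "z4"]

def Spec_sortByGrade (wsis : List String) (out : List (List String)) : Prop := out = sortByGrade_alt wsis
instance (wsis : List String) (out : List (List String)) : Decidable (Spec_sortByGrade wsis out) := by unfold Spec_sortByGrade; infer_instance

-- ===== CLAIM (what is proved, stated in full; the proofs are below) =====
def Claim_equal_sortByGrade : Prop := ∀ (wsis : List String), Dom_sortByGrade wsis → Pre_sortByGrade wsis → Spec_sortByGrade wsis (sortByGrade wsis)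

-- ===== LEMMAS AND PROOFS =====

-- loop invariant: A's fold starting from arbitrary buckets appends exactly B's three filters
lemma sortByGrade_fold_inv (l : List String) (t2 t3 t4 : List String) :
    l.foldl
      (fun (st : List String × List String × List String) slide =>
        let (two, three, four) := st
        let diagPart := pvDiagPart slide
        if PySem.Str.startswith diagPart "GBM" then (two, three, four ++ [slide])
        else
          match PySem.Str.pyGet? diagPart (-1) with
          | none => (two, three, four)
          | some c =>
            if c = '2' then (two ++ [slide], three, four)
            else if c = '3' then (two, three ++ [slide], four)
            else if c = '4' then (two, three, four ++ [slide])
            else (two, three, four))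
      (t2, t3, t4)
    = (t2 ++ l.filter (fun s => !PySem.Str.startswith (pvDiagPart s) "GBM" && pvLastIs (pvDiagPart s) '2'),
       t3 ++ l.filter (fun s => !PySem.Str.startswith (pvDiagPart s) "GBM" && pvLastIs (pvDiagPart s) '3'),
       t4 ++ l.filter (fun s => PySem.Str.startswith (pvDiagPart s) "GBM" || pvLastIs (pvDiagPart s) '4')) := by
  induction l generalizing t2 t3 t4 with
  | nil => simp
  | cons x xs ih =>
    simp only [List.foldl_cons, List.filter_cons]
    by_cases hg : PySem.Str.startswith (pvDiagPart x) "GBM"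
    · simp_all [pvLastIs]
    · cases h : PySem.Str.pyGet? (pvDiagPart x) (-1) with
      | none =>
        simp_all [pvLastIs]
      | some c =>
        by_cases h2 : c = '2'
        · simp_all [pvLastIs]
        · by_cases h3 : c = '3'
          · simp_all [pvLastIs]
          · by_cases h4 : c = '4'
            · simp_all [pvLastIs]
            · simp_all [pvLastIs]

-- ===== VERDICT (by name: the statement is the Claim_ definition above) =====
theorem sortByGrade_spec : Claim_equal_sortByGrade := by
  intro wsis _ _
  unfold Spec_sortByGrade sortByGrade sortByGrade_alt
  rw [sortByGrade_fold_inv]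
  simp
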